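-- pv_equiv track=rewrite | github.com/sangjinsu/python-algorithm-v2 | backjoon/grade/step6/1316.py | count_grouping_word
-- ===== SOURCE A (Python) =====
-- def count_grouping_word(word: str):
--     check_start_letter = dict()
--     i = 0
--     while i < len(word):
--         if word[i] not in check_start_letter:
--             check_start_letter[word[i]] = i
--             i += 1
--             continue
--         if word[i] in check_start_letter.keys():
--             if check_start_letter[word[i]] == i - 1:
--                 check_start_letter[word[i]] = i
--                 i += 1
--                 continue
--             else:
--                 return False
--
--     return True
-- ===== SOURCE B (Python) =====
-- def count_grouping_word(word: str):
--     leaders = []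
--     prev = None
--     for c in word:
--         if c != prev:
--             leaders.append(c)
--             prev = c
--     return len(leaders) == len(set(leaders))
-- ===== Notes on version B (the rewrite author's own statement) =====
-- stated objective: idiomatic
-- what changed: B first compresses the word into its sequence of run leaders (first char of each maximal run of equal chars) and then returns whether those leaders are pairwise distinct, instead of A's index loop maintaining a dict of last-seen positions compared against i-1.
import Mathlib
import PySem

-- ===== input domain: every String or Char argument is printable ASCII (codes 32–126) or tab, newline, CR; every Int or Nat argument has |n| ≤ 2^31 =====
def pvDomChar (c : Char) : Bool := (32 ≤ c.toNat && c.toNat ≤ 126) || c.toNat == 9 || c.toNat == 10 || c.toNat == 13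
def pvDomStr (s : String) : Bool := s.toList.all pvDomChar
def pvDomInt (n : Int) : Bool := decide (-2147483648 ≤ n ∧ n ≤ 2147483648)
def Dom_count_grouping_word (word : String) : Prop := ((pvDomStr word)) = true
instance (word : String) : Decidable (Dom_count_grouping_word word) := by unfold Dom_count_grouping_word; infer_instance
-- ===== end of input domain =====

-- B replaces A's dict-of-last-indices loop by compressing the word into its run leaders and
-- checking those for distinctness; same cost, more idiomatic.

-- ===== PORT A =====
-- the while loop over i, with the dict check_start_letter; iterating i over the word is the remaining char list
def pvLoopA : List Char → PySem.Dict Char Int → Int → Bool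
  | [], _, _ => true
  | c :: rest, d, i =>
    if d.contains c = false then
      pvLoopA rest (d.insert c i) (i + 1)
    else
      if d.getD c 0 == i - 1 then
        pvLoopA rest (d.insert c i) (i + 1)
      else
        false

def count_grouping_word (word : String) : Bool :=
  pvLoopA word.toList PySem.Dict.empty 0

-- ===== PORT B =====
-- the for loop building `leaders` (first char of each maximal run), with `prev` the last char seen
def pvLeaders : List Char → Option Char → List Char
  | [], _ => []
  | c :: rest, prev =>
    if prev == some c then pvLeaders rest prev
    else c :: pvLeaders rest (some c)

def count_grouping_word_alt (word : String) : Bool :=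
  let leaders := pvLeaders word.toList none
  leaders.length == (PySem.Set.ofList leaders).length

-- ===== PRECONDITION & SPEC =====
def Spec_count_grouping_word (word : String) (out : Bool) : Prop := out = count_grouping_word_alt word
instance (word : String) (out : Bool) : Decidable (Spec_count_grouping_word word out) := by unfold Spec_count_grouping_word; infer_instance

-- ===== CLAIM (what is proved, stated in full; the proofs are below) =====
def Claim_equal_count_grouping_word : Prop := ∀ (word : String), Dom_count_grouping_word word → Spec_count_grouping_word word (count_grouping_word word)

-- ===== LEMMAS AND PROOFS =====

-- mid-level checker: walk the chars with the previous char and the set of seen run leaders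
def pvChk : List Char → Option Char → List Char → Bool
  | [], _, _ => true
  | c :: rest, prev, seen =>
    if prev == some c then pvChk rest prev seen
    else if c ∈ seen then false
    else pvChk rest (some c) (seen ++ [c])

lemma loopA_eq_chk : ∀ (cs : List Char) (d : PySem.Dict Char Int) (i : Int) (prev : Option Char),
    (∀ c, (d.contains c = true ∧ d.getD c 0 = i - 1) ↔ prev = some c) →
    (∀ c, d.contains c = true → d.getD c 0 < i) →
    pvLoopA cs d i = pvChk cs prev d.keys := by
  intro cs
  induction cs with
  | nil => intro d i prev _ _; rfl
  | cons c rest ih =>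
    intro d i prev Hprev Hlt
    by_cases hc : d.contains c = true
    · by_cases hv : d.getD c 0 = i - 1
      · -- prev = some c : loop continues, chk skips
        have hp : prev = some c := (Hprev c).mp ⟨hc, hv⟩
        simp only [pvLoopA, pvChk, hc, hv, hp, beq_self_eq_true, if_true, if_false, reduceCtorEq]
        rw [ih (d.insert c i) (i + 1) (some c) ?_ ?_, PySem.Dict.keys_insert_of_contains d i hc]
        · intro c'
          by_cases hcc : c' = c
          · subst hcc
            simp [PySem.Dict.getD_insert_self, PySem.Dict.contains_insert_self]
          · constructor
            · rintro ⟨hco, hval⟩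
              rw [PySem.Dict.getD_insert_of_ne d i 0 (by exact hcc)] at hval
              have : d.contains c' = true := by
                simpa [PySem.Dict.contains_insert, hcc] using hco
              have := Hlt c' this
              omega
            · intro h; exact absurd (Option.some.inj h) (fun e => hcc e.symm)
        · intro c' hco
          by_cases hcc : c' = c
          · subst hcc; rw [PySem.Dict.getD_insert_self]; omega
          · rw [PySem.Dict.getD_insert_of_ne d i 0 (by exact hcc)]
            have : d.contains c' = true := by
              simpa [PySem.Dict.contains_insert, hcc] using hco
            have := Hlt c' this
            omega
      · -- repeated non-adjacent leader: both return false
        have hp : prev ≠ some c := fun h => hv ((Hprev c).mpr h).2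
        have hmem : c ∈ d.keys := (PySem.Dict.contains_iff_mem_keys d c).mp hc
        simp only [pvLoopA, pvChk, hc, beq_iff_eq, Bool.true_eq_false, if_false]
        rw [if_neg hv, if_neg hp, if_pos hmem]
    · -- fresh char: loop inserts, chk records a new leader
      have hp : prev ≠ some c := fun h => hc ((Hprev c).mpr h).1
      have hnmem : c ∉ d.keys := fun h => hc ((PySem.Dict.contains_iff_mem_keys d c).mpr h)
      have hc' : d.contains c = false := by
        cases h : d.contains c with
        | false => rfl
        | true => exact absurd h hc
      simp only [pvLoopA, pvChk, hc', if_true, beq_iff_eq]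
      rw [if_neg hp, if_neg hnmem]
      rw [ih (d.insert c i) (i + 1) (some c) ?_ ?_, PySem.Dict.keys_insert_of_not_contains d i hc']
      · intro c'
        by_cases hcc : c' = c
        · subst hcc
          simp [PySem.Dict.getD_insert_self, PySem.Dict.contains_insert_self]
        · constructor
          · rintro ⟨hco, hval⟩
            rw [PySem.Dict.getD_insert_of_ne d i 0 (by exact hcc)] at hval
            have : d.contains c' = true := by
              simpa [PySem.Dict.contains_insert, hcc] using hco
            have := Hlt c' this
            omega
          · intro h; exact absurd (Option.some.inj h) (fun e => hcc e.symm)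
      · intro c' hco
        by_cases hcc : c' = c
        · subst hcc; rw [PySem.Dict.getD_insert_self]; omega
        · rw [PySem.Dict.getD_insert_of_ne d i 0 (by exact hcc)]
          have : d.contains c' = true := by
            simpa [PySem.Dict.contains_insert, hcc] using hco
          have := Hlt c' this
          omega

lemma chk_iff : ∀ (cs : List Char) (prev : Option Char) (seen : List Char),
    pvChk cs prev seen = true ↔
      ((pvLeaders cs prev).Nodup ∧ ∀ x ∈ pvLeaders cs prev, x ∉ seen) := by
  intro cs
  induction cs with
  | nil => intro prev seen; simp [pvChk, pvLeaders]
  | cons c rest ih =>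
    intro prev seen
    by_cases hp : prev = some c
    · simp only [pvChk, pvLeaders, hp, beq_self_eq_true, if_true]
      exact ih (some c) seen
    · have hpb : (prev == some c) = false := by simpa using hp
      by_cases hs : c ∈ seen
      · simp only [pvChk, pvLeaders, hpb, Bool.false_eq_true, if_false, if_pos hs,
          false_iff, not_and]
        intro _ h
        exact absurd hs (h c (by simp))
      · simp only [pvChk, pvLeaders, hpb, Bool.false_eq_true, if_false, if_neg hs]
        rw [ih (some c) (seen ++ [c])]
        constructor
        · rintro ⟨hnd, hall⟩
          refine ⟨List.nodup_cons.mpr ⟨fun h => by simpa using (hall c h), hnd⟩, ?_⟩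
          intro x hx
          rcases List.mem_cons.mp hx with h | h
          · subst h; exact hs
          · intro hxs; exact hall x h (by simp [hxs])
        · rintro ⟨hnd, hall⟩
          have hnd' := List.nodup_cons.mp hnd
          refine ⟨hnd'.2, ?_⟩
          intro x hx
          simp only [List.mem_append, List.mem_singleton, not_or]
          exact ⟨hall x (by simp [hx]), fun e => hnd'.1 (e ▸ hx)⟩

lemma len_ofList_eq_iff (xs : List Char) :
    ((PySem.Set.ofList xs).length = xs.length) ↔ xs.Nodup := by
  induction xs using List.reverseRecOn with
  | nil => simp [PySem.Set.ofList_nil]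
  | append_singleton xs x ih =>
    rw [PySem.Set.ofList_append_singleton]
    by_cases hx : x ∈ xs
    · have hmem : PySem.Set.contains (PySem.Set.ofList xs) x = true :=
        (PySem.Set.contains_iff _ x).mpr ((PySem.Set.mem_ofList xs x).mpr hx)
      have hadd : PySem.Set.add (PySem.Set.ofList xs) x = PySem.Set.ofList xs := by
        simp only [PySem.Set.add, hmem, if_true]
      rw [hadd]
      have hle := PySem.Set.length_ofList_le (xs := xs)
      simp only [List.length_append, List.length_singleton, List.nodup_append]
      constructor
      · intro h; omega
      · rintro ⟨-, -, hdis⟩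
        exact absurd rfl (hdis x hx x (by simp))
    · have hmem : PySem.Set.contains (PySem.Set.ofList xs) x = false := by
        cases h : PySem.Set.contains (PySem.Set.ofList xs) x with
        | false => rfl
        | true =>
          exact absurd ((PySem.Set.mem_ofList xs x).mp ((PySem.Set.contains_iff (PySem.Set.ofList xs) x).mp h)) hx
      have hadd : PySem.Set.add (PySem.Set.ofList xs) x = PySem.Set.ofList xs ++ [x] := by
        simp [PySem.Set.add, hx]
      rw [hadd]
      simp only [List.length_append, List.length_singleton, List.nodup_append,
        List.nodup_singleton, List.mem_singleton]
      constructor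
      · intro h
        have hnd := ih.mp (by omega)
        exact ⟨hnd, trivial, fun a ha b hb => fun e => hx (by subst hb; exact e ▸ ha)⟩
      · rintro ⟨hnd, -, -⟩
        rw [ih.mpr hnd]

-- ===== VERDICT (by name: the statement is the Claim_ definition above) =====
theorem count_grouping_word_spec : Claim_equal_count_grouping_word := by
  intro word _
  unfold Spec_count_grouping_word count_grouping_word count_grouping_word_alt
  rw [loopA_eq_chk word.toList PySem.Dict.empty 0 none
        (by intro c; simp [PySem.Dict.contains_empty])
        (by intro c h; simp [PySem.Dict.contains_empty] at h)]
  rw [Bool.eq_iff_iff]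
  rw [show (PySem.Dict.empty : PySem.Dict Char Int).keys = [] from rfl]
  rw [chk_iff]
  simp only [beq_iff_eq, List.not_mem_nil, not_false_iff, implies_true, and_true]
  rw [← len_ofList_eq_iff]
  exact (eq_comm)
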